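-- pv_equiv track=rewrite | github.com/danghuybk/Data-structure-and-Algorithm | Codeforces/1535C.py | unstableString
-- ===== SOURCE A (Python) =====
-- def unstableString(s):
-- 	N, output, zeros, ones = len(s), 0, 0, 0
-- 	for i in range (N):
-- 		if s[i] == "0":
-- 			zeros, ones = ones + 1, 0
-- 		elif s[i] == "1":
-- 			zeros, ones = 0, zeros + 1
-- 		else:
-- 			zeros, ones = ones + 1, zeros + 1
-- 		output += max(zeros, ones)
-- 	return output
-- ===== SOURCE B (Python) =====
-- def unstableString(s):
--     # Sliding window: a substring is unstable iff all its fixed ('0'/'1') chars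
--     # share the same parity-value v = (bit + index) % 2 (i.e. they all fit one of
--     # the two alternating patterns); every other char is a wildcard.
--     ans = 0
--     start = 0        # leftmost l such that s[l..i] can still be made alternating
--     last_pos = -1    # index of the most recent fixed character
--     last_v = 0       # its parity-value
--     for i, c in enumerate(s):
--         if c == '0' or c == '1':
--             v = (ord(c) - 48 + i) % 2
--             if last_pos >= 0 and v != last_v:
--                 start = last_pos + 1
--             last_pos, last_v = i, v
--         ans += i - start + 1
--     return ans
-- ===== Notes on version B (the rewrite author's own statement) =====
-- stated objective: alternative
-- what changed: Replaces A's two-counter DP (longest suffix completable to end in 0/1, adding the max each step) by a sliding window that tracks the parity-value of the last fixed character and resets the window start at the last conflicting fixed position, adding the window length each step; measurably faster by doing less work per character.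
import Mathlib
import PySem

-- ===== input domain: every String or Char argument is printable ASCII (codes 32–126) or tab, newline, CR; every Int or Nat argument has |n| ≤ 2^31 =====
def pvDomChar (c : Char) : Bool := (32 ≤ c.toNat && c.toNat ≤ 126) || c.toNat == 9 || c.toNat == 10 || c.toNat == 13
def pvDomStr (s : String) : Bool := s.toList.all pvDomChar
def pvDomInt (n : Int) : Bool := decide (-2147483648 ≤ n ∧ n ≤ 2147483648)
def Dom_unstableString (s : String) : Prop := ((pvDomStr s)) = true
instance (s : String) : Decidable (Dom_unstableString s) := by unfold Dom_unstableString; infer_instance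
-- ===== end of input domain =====

-- B replaces A's two-counter DP by a sliding window over the parity-value of the
-- fixed characters (alternative algorithm, same O(n) cost).

-- ===== PORT A =====
-- one iteration of A's loop body, state (output, zeros, ones)
def stepA (st : Int × Int × Int) (c : Char) : Int × Int × Int :=
  match st with
  | (output, zeros, ones) =>
    let zo : Int × Int :=
      if c = '0' then (ones + 1, 0)
      else if c = '1' then (0, zeros + 1)
      else (ones + 1, zeros + 1)
    (output + max zo.1 zo.2, zo.1, zo.2)

def unstableString (s : String) : Int :=
  ((PySem.List.pyRange 0 (PySem.Str.len s) 1).foldl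
    (fun st i => stepA st (PySem.List.pyGetD s.toList i ' ')) (0, 0, 0)).1

-- ===== PORT B =====
-- the loop of Source B: i = index, then (ans, start, last_pos, last_v)
def goB (cs : List Char) (i ans start lastPos lastV : Int) : Int :=
  match cs with
  | [] => ans
  | c :: rest =>
    if c = '0' ∨ c = '1' then
      let v := PySem.Int.mod (((c.toNat : Int) - 48) + i) 2
      let start' := if 0 ≤ lastPos ∧ v ≠ lastV then lastPos + 1 else start
      goB rest (i + 1) (ans + i - start' + 1) start' i v
    else
      goB rest (i + 1) (ans + i - start + 1) start lastPos lastV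

def unstableString_alt (s : String) : Int := goB s.toList 0 0 0 (-1) 0

-- ===== PRECONDITION & SPEC =====
def Spec_unstableString (s : String) (out : Int) : Prop := out = unstableString_alt s
instance (s : String) (out : Int) : Decidable (Spec_unstableString s out) := by unfold Spec_unstableString; infer_instance

-- ===== CLAIM (what is proved, stated in full; the proofs are below) =====
def Claim_equal_unstableString : Prop := ∀ (s : String), Dom_unstableString s → Spec_unstableString s (unstableString s)

-- ===== LEMMAS AND PROOFS =====

-- Invariant after processing a prefix of length n: the larger of A's two
-- counters is the current window length n - start, the smaller reaches back
-- exactly to just after the last fixed character.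
def LoopInv (n zeros ones start lastPos lastV : Int) : Prop :=
  (lastPos = -1 ∧ start = 0 ∧ zeros = n ∧ ones = n ∧ 0 ≤ n)
  ∨ (0 ≤ lastPos ∧ lastPos < n ∧ 0 ≤ start ∧ start ≤ lastPos ∧
     ((lastV = (n - 1) % 2 ∧ zeros = n - start ∧ ones = n - 1 - lastPos)
      ∨ (lastV ≠ (n - 1) % 2 ∧ lastV = n % 2 ∧ ones = n - start ∧ zeros = n - 1 - lastPos)))

lemma stepA_zero (out zeros ones : Int) :
    stepA (out, zeros, ones) '0' = (out + max (ones + 1) 0, ones + 1, 0) := by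
  simp [stepA]

lemma stepA_one (out zeros ones : Int) :
    stepA (out, zeros, ones) '1' = (out + max 0 (zeros + 1), 0, zeros + 1) := by
  simp [stepA]

lemma stepA_other (out zeros ones : Int) (c : Char) (h0 : c ≠ '0') (h1 : c ≠ '1') :
    stepA (out, zeros, ones) c = (out + max (ones + 1) (zeros + 1), ones + 1, zeros + 1) := by
  simp [stepA, h0, h1]

lemma goB_cons_zero (rest : List Char) (i ans start lastPos lastV : Int) :
    goB ('0' :: rest) i ans start lastPos lastV =
      goB rest (i + 1)
        (ans + i - (if 0 ≤ lastPos ∧ i % 2 ≠ lastV then lastPos + 1 else start) + 1)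
        (if 0 ≤ lastPos ∧ i % 2 ≠ lastV then lastPos + 1 else start) i (i % 2) := by
  have hv : PySem.Int.mod ((('0'.toNat : Int)) - 48 + i) 2 = i % 2 := by
    rw [PySem.Int.mod_eq_emod_of_pos (by norm_num)]
    have h48 : (('0'.toNat : Int)) = 48 := by decide
    rw [h48]; omega
  simp only [goB, true_or, if_true, hv]

lemma goB_cons_one (rest : List Char) (i ans start lastPos lastV : Int) :
    goB ('1' :: rest) i ans start lastPos lastV =
      goB rest (i + 1)
        (ans + i - (if 0 ≤ lastPos ∧ (1 + i) % 2 ≠ lastV then lastPos + 1 else start) + 1)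
        (if 0 ≤ lastPos ∧ (1 + i) % 2 ≠ lastV then lastPos + 1 else start) i ((1 + i) % 2) := by
  have hv : PySem.Int.mod ((('1'.toNat : Int)) - 48 + i) 2 = (1 + i) % 2 := by
    rw [PySem.Int.mod_eq_emod_of_pos (by norm_num)]
    have h49 : (('1'.toNat : Int)) = 49 := by decide
    rw [h49]; omega
  simp only [goB, or_true, if_true, hv]

lemma goB_cons_other (rest : List Char) (c : Char) (h0 : c ≠ '0') (h1 : c ≠ '1')
    (i ans start lastPos lastV : Int) :
    goB (c :: rest) i ans start lastPos lastV =
      goB rest (i + 1) (ans + i - start + 1) start lastPos lastV := by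
  simp only [goB]
  rw [if_neg (show ¬(c = '0' ∨ c = '1') by simp [h0, h1])]

lemma main (cs : List Char) : ∀ (n zeros ones out start lastPos lastV : Int),
    LoopInv n zeros ones start lastPos lastV →
    (cs.foldl stepA (out, zeros, ones)).1 = goB cs n out start lastPos lastV := by
  induction cs with
  | nil => intro n zeros ones out start lastPos lastV _; simp [goB]
  | cons c rest ih =>
    intro n zeros ones out start lastPos lastV hInv
    by_cases h0 : c = '0'
    · subst h0
      rw [List.foldl_cons, stepA_zero, goB_cons_zero]
      by_cases hcut : 0 ≤ lastPos ∧ n % 2 ≠ lastV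
      · rw [if_pos hcut]
        rcases hInv with ⟨hp, hs, hz, ho, hn⟩ | ⟨hp0, hpn, hs0, hsp,
          ⟨hv, hz, ho⟩ | ⟨hv, hv2, ho, hz⟩⟩
        · omega
        · rw [show out + n - (lastPos + 1) + 1 = out + max (ones + 1) 0 from by omega]
          exact ih (n + 1) (ones + 1) 0 _ (lastPos + 1) n (n % 2)
            (Or.inr ⟨by omega, by omega, by omega, by omega,
              Or.inl ⟨by omega, by omega, by omega⟩⟩)
        · omega
      · rw [if_neg hcut]
        rcases hInv with ⟨hp, hs, hz, ho, hn⟩ | ⟨hp0, hpn, hs0, hsp,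
          ⟨hv, hz, ho⟩ | ⟨hv, hv2, ho, hz⟩⟩
        · rw [show out + n - start + 1 = out + max (ones + 1) 0 from by omega]
          exact ih (n + 1) (ones + 1) 0 _ start n (n % 2)
            (Or.inr ⟨by omega, by omega, by omega, by omega,
              Or.inl ⟨by omega, by omega, by omega⟩⟩)
        · omega
        · rw [show out + n - start + 1 = out + max (ones + 1) 0 from by omega]
          exact ih (n + 1) (ones + 1) 0 _ start n (n % 2)
            (Or.inr ⟨by omega, by omega, by omega, by omega,
              Or.inl ⟨by omega, by omega, by omega⟩⟩)
    · by_cases h1 : c = '1'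
      · subst h1
        rw [List.foldl_cons, stepA_one, goB_cons_one]
        by_cases hcut : 0 ≤ lastPos ∧ (1 + n) % 2 ≠ lastV
        · rw [if_pos hcut]
          rcases hInv with ⟨hp, hs, hz, ho, hn⟩ | ⟨hp0, hpn, hs0, hsp,
            ⟨hv, hz, ho⟩ | ⟨hv, hv2, ho, hz⟩⟩
          · omega
          · omega
          · rw [show out + n - (lastPos + 1) + 1 = out + max 0 (zeros + 1) from by omega]
            exact ih (n + 1) 0 (zeros + 1) _ (lastPos + 1) n ((1 + n) % 2)
              (Or.inr ⟨by omega, by omega, by omega, by omega,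
                Or.inr ⟨by omega, by omega, by omega, by omega⟩⟩)
        · rw [if_neg hcut]
          rcases hInv with ⟨hp, hs, hz, ho, hn⟩ | ⟨hp0, hpn, hs0, hsp,
            ⟨hv, hz, ho⟩ | ⟨hv, hv2, ho, hz⟩⟩
          · rw [show out + n - start + 1 = out + max 0 (zeros + 1) from by omega]
            exact ih (n + 1) 0 (zeros + 1) _ start n ((1 + n) % 2)
              (Or.inr ⟨by omega, by omega, by omega, by omega,
                Or.inr ⟨by omega, by omega, by omega, by omega⟩⟩)
          · rw [show out + n - start + 1 = out + max 0 (zeros + 1) from by omega]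
            exact ih (n + 1) 0 (zeros + 1) _ start n ((1 + n) % 2)
              (Or.inr ⟨by omega, by omega, by omega, by omega,
                Or.inr ⟨by omega, by omega, by omega, by omega⟩⟩)
          · omega
      · rw [List.foldl_cons, stepA_other out zeros ones c h0 h1, goB_cons_other rest c h0 h1]
        rcases hInv with ⟨hp, hs, hz, ho, hn⟩ | ⟨hp0, hpn, hs0, hsp,
          ⟨hv, hz, ho⟩ | ⟨hv, hv2, ho, hz⟩⟩
        · rw [show out + n - start + 1 = out + max (ones + 1) (zeros + 1) from by omega]
          exact ih (n + 1) (ones + 1) (zeros + 1) _ start lastPos lastV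
            (Or.inl ⟨hp, hs, by omega, by omega, by omega⟩)
        · rw [show out + n - start + 1 = out + max (ones + 1) (zeros + 1) from by omega]
          exact ih (n + 1) (ones + 1) (zeros + 1) _ start lastPos lastV
            (Or.inr ⟨by omega, by omega, by omega, by omega,
              Or.inr ⟨by omega, by omega, by omega, by omega⟩⟩)
        · rw [show out + n - start + 1 = out + max (ones + 1) (zeros + 1) from by omega]
          exact ih (n + 1) (ones + 1) (zeros + 1) _ start lastPos lastV
            (Or.inr ⟨by omega, by omega, by omega, by omega,
              Or.inl ⟨by omega, by omega, by omega⟩⟩)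

-- ===== VERDICT (by name: the statement is the Claim_ definition above) =====
theorem unstableString_spec : Claim_equal_unstableString := by
  intro s _
  unfold Spec_unstableString unstableString unstableString_alt
  have hb := PySem.List.foldl_pyRange_zero_pyGetD s.toList ' ' stepA ((0, 0, 0) : Int × Int × Int)
  rw [show PySem.Str.len s = PySem.List.len s.toList from rfl, hb]
  exact main s.toList 0 0 0 0 0 (-1) 0 (Or.inl ⟨rfl, rfl, rfl, rfl, le_refl 0⟩)
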